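-- pv_equiv track=rewrite | github.com/drizztSun/common_project | PythonLeetcode/leetcodeM/1055_ShortestWayToFormString.py | doit_search
-- ===== SOURCE A (Python) =====
-- def doit_search(source: str, target: str) -> int:
--
--     i, j = 0, 0
--     cnt = 0
--
--     while i < len(target):
--
--         start = j
--         while j < len(source) and source[j] != target[i]:
--             j += 1
--
--         if start == 0 and j == len(source):
--             return -1
--
--         if j != len(source) and source[j] == target[i]:
--             i += 1
--             j += 1
--
--             if i == len(target) and j < len(source):
--                 cnt += 1
--
--         if j == len(source):
--             j = 0
--             cnt += 1
--
--     return cnt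
-- ===== SOURCE B (Python) =====
-- def doit_search(source: str, target: str) -> int:
--     n = len(source)
--     # nxt[i] maps each char to its first occurrence in source at index >= i
--     nxt = [dict() for _ in range(n + 1)]
--     for i in range(n - 1, -1, -1):
--         d = dict(nxt[i + 1])
--         d[source[i]] = i
--         nxt[i] = d
--     if not target:
--         return 0
--     cnt, j = 1, 0
--     for ch in target:
--         p = nxt[j].get(ch)
--         if p is None:
--             p = nxt[0].get(ch)
--             if p is None:
--                 return -1
--             cnt += 1
--         j = p + 1
--     return cnt
-- ===== Notes on version B (the rewrite author's own statement) =====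
-- stated objective: alternative
-- what changed: B precomputes, in one backward pass over source, a next-occurrence table (for each position, the first index >= it of every char) and answers each target char with one dictionary lookup (falling back to the table at index 0 when a new pass starts), instead of A's wrapping two-pointer walk that re-scans source linearly for every target char; the table costs O(|source|*sigma) to build, so B is not measurably faster overall.
import Mathlib
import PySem

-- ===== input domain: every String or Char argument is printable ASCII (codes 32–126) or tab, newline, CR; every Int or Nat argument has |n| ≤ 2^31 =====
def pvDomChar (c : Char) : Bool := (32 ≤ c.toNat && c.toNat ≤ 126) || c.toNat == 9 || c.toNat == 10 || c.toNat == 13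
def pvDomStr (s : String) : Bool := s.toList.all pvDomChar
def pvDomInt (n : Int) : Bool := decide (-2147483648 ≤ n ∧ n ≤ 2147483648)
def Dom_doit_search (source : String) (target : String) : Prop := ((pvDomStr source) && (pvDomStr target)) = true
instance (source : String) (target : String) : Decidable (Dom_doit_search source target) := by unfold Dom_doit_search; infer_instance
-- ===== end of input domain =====

-- B answers each target char by one lookup in a precomputed next-occurrence
-- table (one dict per source position) instead of A's wrapping two-pointer
-- walk that re-scans source; a structural alternative, not measured faster.


-- ===== PORT A =====
-- inner `while j < len(source) and source[j] != target[i]`: walks the suffix of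
-- source starting at index j, keeping the running index j in step with it
def scanFrom : List Char → Char → Nat → Nat
  | [], _, j => j
  | x :: xs, c, j => if x ≠ c then scanFrom xs c (j + 1) else j

def innerScan (s : List Char) (c : Char) (j : Nat) : Nat := scanFrom (s.drop j) c j

-- outer `while i < len(target)` loop of A, structurally on the remaining target.
-- A Python iteration that misses with j ≠ 0 only wraps (j = 0; cnt += 1) and the
-- NEXT iteration rescans from 0 for the same target char; that rescan is inlined
-- here (else-branch), so each step consumes exactly one target char: same scans,
-- same counter updates, same branch order as A.
def loopA (s : List Char) (rem : List Char) (j cnt : Nat) : Int :=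
  match rem with
  | [] => cnt
  | c :: rest =>
    if j = 0 ∧ innerScan s c j = s.length then -1
    else if innerScan s c j ≠ s.length ∧ s[innerScan s c j]? = some c then
      -- match: i += 1; j += 1; final-pass and wrap bookkeeping
      if innerScan s c j + 1 = s.length then
        loopA s rest 0
          ((if rest = [] ∧ innerScan s c j + 1 < s.length then cnt + 1 else cnt) + 1)
      else
        loopA s rest (innerScan s c j + 1)
          (if rest = [] ∧ innerScan s c j + 1 < s.length then cnt + 1 else cnt)
    else
      -- miss with j ≠ 0: wrap (j = 0, cnt += 1), rescan from 0 for the same char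
      if innerScan s c 0 = s.length then -1
      else if innerScan s c 0 + 1 = s.length then
        loopA s rest 0
          ((if rest = [] ∧ innerScan s c 0 + 1 < s.length then cnt + 1 + 1 else cnt + 1) + 1)
      else
        loopA s rest (innerScan s c 0 + 1)
          (if rest = [] ∧ innerScan s c 0 + 1 < s.length then cnt + 1 + 1 else cnt + 1)

def doit_search (source : String) (target : String) : Int :=
  loopA source.toList target.toList 0 0

-- ===== PORT B =====
-- `for i in range(n-1, -1, -1): d = dict(nxt[i+1]); d[source[i]] = i; nxt[i] = d`
-- built as structural recursion over the suffix of source starting at absolute index i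
def buildNxt : List Char → Nat → List (PySem.Dict Char Nat)
  | [], _ => [PySem.Dict.empty]
  | ch :: rest, i =>
    let tail := buildNxt rest (i + 1)
    ((tail.headD PySem.Dict.empty).insert ch i) :: tail

-- `for ch in target:` loop of B with its early `return -1`
def loopB (nxt : List (PySem.Dict Char Nat)) (rem : List Char) (cnt : Int) (j : Nat) : Int :=
  match rem with
  | [] => cnt
  | c :: rest =>
    match (nxt.getD j PySem.Dict.empty).get? c with
    | some p => loopB nxt rest cnt (p + 1)
    | none =>
      match (nxt.getD 0 PySem.Dict.empty).get? c with
      | none => -1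
      | some p => loopB nxt rest (cnt + 1) (p + 1)

def doit_search_alt (source : String) (target : String) : Int :=
  if target.toList.isEmpty then 0
  else loopB (buildNxt source.toList 0) target.toList 1 0

-- ===== PRECONDITION & SPEC =====
def Spec_doit_search (source : String) (target : String) (out : Int) : Prop := out = doit_search_alt source target
instance (source : String) (target : String) (out : Int) : Decidable (Spec_doit_search source target out) := by unfold Spec_doit_search; infer_instance

-- ===== CLAIM (what is proved, stated in full; the proofs are below) =====
def Claim_equal_doit_search : Prop := ∀ (source : String) (target : String), Dom_doit_search source target → Spec_doit_search source target (doit_search source target)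

-- ===== LEMMAS AND PROOFS =====

theorem scanFrom_add (l : List Char) (c : Char) (j : Nat) :
    scanFrom l c j = j + scanFrom l c 0 := by
  induction l generalizing j with
  | nil => simp [scanFrom]
  | cons x xs ih =>
    simp only [scanFrom]
    split_ifs
    · rw [ih (j + 1), ih 1]; omega
    · omega

theorem scanFrom_le (l : List Char) (c : Char) (j : Nat) :
    scanFrom l c j ≤ j + l.length := by
  induction l generalizing j with
  | nil => simp [scanFrom]
  | cons x xs ih =>
    simp only [scanFrom, List.length_cons]
    split_ifs
    · have := ih (j + 1); omega
    · omega

theorem innerScan_le (s : List Char) (c : Char) (j : Nat) (hj : j ≤ s.length) :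
    innerScan s c j ≤ s.length := by
  have h := scanFrom_le (s.drop j) c j
  rw [List.length_drop] at h
  unfold innerScan
  omega

theorem innerScan_hit (s : List Char) (c : Char) (j : Nat) (hj : j ≤ s.length)
    (h : innerScan s c j < s.length) : s[innerScan s c j]? = some c := by
  unfold innerScan at *
  induction hk : s.length - j generalizing j with
  | zero =>
    have hdrop : s.drop j = [] := List.drop_eq_nil_of_le (by omega)
    rw [hdrop] at h
    simp only [scanFrom] at h
    omega
  | succ k ih =>
    have hjlt : j < s.length := by omega
    rw [List.drop_eq_getElem_cons hjlt] at h ⊢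
    simp only [scanFrom] at h ⊢
    by_cases hx : s[j] ≠ c
    · rw [if_pos hx] at h ⊢
      exact ih (j + 1) (by omega) h (by omega)
    · rw [if_neg hx] at h ⊢
      simp only [not_not] at hx
      simp [List.getElem?_eq_getElem hjlt, hx]

theorem innerScan_len (s : List Char) (c : Char) : innerScan s c s.length = s.length := by
  unfold innerScan
  rw [List.drop_length]
  rfl

theorem innerScan_eq_len (s : List Char) (c : Char) (j : Nat) (hj : j ≤ s.length)
    (h : ¬(innerScan s c j ≠ s.length ∧ s[innerScan s c j]? = some c)) :
    innerScan s c j = s.length := by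
  by_contra hne
  have hlt : innerScan s c j < s.length := by have := innerScan_le s c j hj; omega
  exact h ⟨hne, innerScan_hit s c j hj hlt⟩

theorem buildNxt_head (S : List Char) (i : Nat) (c : Char) :
    ((buildNxt S i).headD PySem.Dict.empty).get? c =
      if scanFrom S c 0 < S.length then some (i + scanFrom S c 0) else none := by
  induction S generalizing i with
  | nil => simp [buildNxt, scanFrom, PySem.Dict.get?_empty]
  | cons x xs ih =>
    simp only [buildNxt, List.headD_cons]
    rw [PySem.Dict.get?_insert]
    by_cases hc : c = x
    · subst hc
      simp [scanFrom]
    · rw [if_neg hc, ih (i + 1)]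
      have h0 : scanFrom (x :: xs) c 0 = scanFrom xs c 0 + 1 := by
        simp only [scanFrom]
        rw [if_pos (by simpa using fun h => hc h.symm), scanFrom_add]
        omega
      rw [h0]
      simp only [List.length_cons, Nat.add_lt_add_iff_right]
      split_ifs with h1
      · congr 1; omega
      · rfl

theorem buildNxt_getD (S : List Char) (i j : Nat) (hj : j ≤ S.length) :
    (buildNxt S i).getD j PySem.Dict.empty = (buildNxt (S.drop j) (i + j)).headD PySem.Dict.empty := by
  induction S generalizing i j with
  | nil =>
    simp only [List.length_nil, Nat.le_zero] at hj; subst hj; simp [buildNxt]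
  | cons x xs ih =>
    cases j with
    | zero => simp [buildNxt]
    | succ j =>
      simp only [buildNxt, List.getD_cons_succ, List.drop_succ_cons]
      rw [ih (i + 1) j (by simpa using hj)]
      have h2 : i + 1 + j = i + (j + 1) := by omega
      rw [h2]

theorem nxt_lookup (S : List Char) (j : Nat) (c : Char) (hj : j ≤ S.length) :
    ((buildNxt S 0).getD j PySem.Dict.empty).get? c =
      if innerScan S c j < S.length then some (innerScan S c j) else none := by
  rw [buildNxt_getD S 0 j hj, buildNxt_head]
  have hsum : innerScan S c j = j + scanFrom (S.drop j) c 0 := by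
    unfold innerScan; rw [scanFrom_add]
  have hle := scanFrom_le (S.drop j) c 0
  rw [List.length_drop] at hle ⊢
  rw [hsum]
  split_ifs with h1 h2 h2
  · congr 1; omega
  · omega
  · omega
  · rfl

theorem loopB_shift (nxt : List (PySem.Dict Char Nat)) (c : Char) (rest : List Char)
    (cnt : Int) (j : Nat) (h : (nxt.getD j PySem.Dict.empty).get? c = none) :
    loopB nxt (c :: rest) cnt j = loopB nxt (c :: rest) (cnt + 1) 0 := by
  simp only [loopB]
  rw [h]
  cases hc : (nxt.getD 0 PySem.Dict.empty).get? c <;> rfl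

theorem loopB_cons_hit (nxt : List (PySem.Dict Char Nat)) (c : Char) (rest : List Char)
    (cnt : Int) (j p : Nat) (h : (nxt.getD j PySem.Dict.empty).get? c = some p) :
    loopB nxt (c :: rest) cnt j = loopB nxt rest cnt (p + 1) := by
  simp only [loopB]
  rw [h]

theorem loopB_cons_miss (nxt : List (PySem.Dict Char Nat)) (c : Char) (rest : List Char)
    (cnt : Int) (j p : Nat) (h1 : (nxt.getD j PySem.Dict.empty).get? c = none)
    (h0 : (nxt.getD 0 PySem.Dict.empty).get? c = some p) :
    loopB nxt (c :: rest) cnt j = loopB nxt rest (cnt + 1) (p + 1) := by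
  simp only [loopB]
  rw [h1, h0]

theorem loopB_cons_dead (nxt : List (PySem.Dict Char Nat)) (c : Char) (rest : List Char)
    (cnt : Int) (j : Nat) (h1 : (nxt.getD j PySem.Dict.empty).get? c = none)
    (h0 : (nxt.getD 0 PySem.Dict.empty).get? c = none) :
    loopB nxt (c :: rest) cnt j = -1 := by
  simp only [loopB]
  rw [h1, h0]

theorem loopA_eq_loopB (S : List Char) (c : Char) (rest : List Char) (j cnt : Nat)
    (hj : j ≤ S.length) :
    loopA S (c :: rest) j cnt = loopB (buildNxt S 0) (c :: rest) ((cnt : Int) + 1) j := by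
  induction rest generalizing c j cnt with
  | nil =>
    by_cases h1 : j = 0 ∧ innerScan S c j = S.length
    · obtain ⟨hj0, hlen⟩ := h1
      subst hj0
      rw [loopB_cons_dead _ _ _ _ _ (by rw [nxt_lookup S 0 c (Nat.zero_le _), if_neg (by omega)])
            (by rw [nxt_lookup S 0 c (Nat.zero_le _), if_neg (by omega)]), loopA.eq_def]
      simp [hlen]
    · by_cases h2 : innerScan S c j ≠ S.length ∧ S[innerScan S c j]? = some c
      · have hlt : innerScan S c j < S.length := by
          have := innerScan_le S c j hj; omega
        rw [loopA.eq_def]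
        simp only [if_neg h1, if_pos h2]
        rw [loopB_cons_hit _ _ _ _ _ _ (by rw [nxt_lookup S j c hj, if_pos hlt])]
        simp only [loopA, loopB, true_and]
        split_ifs <;> push_cast <;> omega
      · have hlen : innerScan S c j = S.length := innerScan_eq_len S c j hj h2
        have hnone : ((buildNxt S 0).getD j PySem.Dict.empty).get? c = none := by
          rw [nxt_lookup S j c hj, if_neg (by omega)]
        rw [loopA.eq_def]
        simp only [if_neg h1, if_neg h2]
        by_cases h3 : innerScan S c 0 = S.length
        · rw [if_pos h3]
          rw [loopB_cons_dead _ _ _ _ _ hnone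
                (by rw [nxt_lookup S 0 c (Nat.zero_le _), if_neg (by omega)])]
        · have hlt0 : innerScan S c 0 < S.length := by
            have := innerScan_le S c 0 (Nat.zero_le _); omega
          rw [if_neg h3]
          rw [loopB_cons_miss _ _ _ _ _ _ hnone
                (by rw [nxt_lookup S 0 c (Nat.zero_le _), if_pos hlt0])]
          simp only [loopA, loopB, true_and]
          split_ifs <;> push_cast <;> omega
  | cons c2 rest2 ih =>
    by_cases h1 : j = 0 ∧ innerScan S c j = S.length
    · obtain ⟨hj0, hlen⟩ := h1
      subst hj0
      rw [loopB_cons_dead _ _ _ _ _ (by rw [nxt_lookup S 0 c (Nat.zero_le _), if_neg (by omega)])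
            (by rw [nxt_lookup S 0 c (Nat.zero_le _), if_neg (by omega)]), loopA.eq_def]
      simp [hlen]
    · by_cases h2 : innerScan S c j ≠ S.length ∧ S[innerScan S c j]? = some c
      · have hlt : innerScan S c j < S.length := by
          have := innerScan_le S c j hj; omega
        rw [loopA.eq_def]
        simp only [if_neg h1, if_pos h2]
        rw [loopB_cons_hit _ _ _ _ _ _ (by rw [nxt_lookup S j c hj, if_pos hlt])]
        by_cases hw : innerScan S c j + 1 = S.length
        · rw [if_pos hw, if_neg (by simp), ih c2 0 (cnt + 1) (Nat.zero_le _), hw]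
          conv_rhs => rw [loopB_shift _ _ _ _ _
                (by rw [nxt_lookup S S.length c2 le_rfl, innerScan_len, if_neg (by omega)])]
          push_cast
          ring_nf
        · rw [if_neg hw, if_neg (by simp), ih c2 (innerScan S c j + 1) cnt (by omega)]
      · have hlen : innerScan S c j = S.length := innerScan_eq_len S c j hj h2
        have hnone : ((buildNxt S 0).getD j PySem.Dict.empty).get? c = none := by
          rw [nxt_lookup S j c hj, if_neg (by omega)]
        rw [loopA.eq_def]
        simp only [if_neg h1, if_neg h2]
        by_cases h3 : innerScan S c 0 = S.length
        · rw [if_pos h3]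
          rw [loopB_cons_dead _ _ _ _ _ hnone
                (by rw [nxt_lookup S 0 c (Nat.zero_le _), if_neg (by omega)])]
        · have hlt0 : innerScan S c 0 < S.length := by
            have := innerScan_le S c 0 (Nat.zero_le _); omega
          rw [if_neg h3]
          rw [loopB_cons_miss _ _ _ _ _ _ hnone
                (by rw [nxt_lookup S 0 c (Nat.zero_le _), if_pos hlt0])]
          by_cases hw : innerScan S c 0 + 1 = S.length
          · rw [if_pos hw, if_neg (by simp), ih c2 0 (cnt + 1 + 1) (Nat.zero_le _), hw]
            conv_rhs => rw [loopB_shift _ _ _ _ _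
                  (by rw [nxt_lookup S S.length c2 le_rfl, innerScan_len, if_neg (by omega)])]
            push_cast
            ring_nf
          · rw [if_neg hw, if_neg (by simp), ih c2 (innerScan S c 0 + 1) (cnt + 1) (by omega)]
            push_cast
            ring_nf

-- ===== VERDICT (by name: the statement is the Claim_ definition above) =====
theorem doit_search_spec : Claim_equal_doit_search := by
  intro source target _
  unfold Spec_doit_search doit_search doit_search_alt
  cases hT : target.toList with
  | nil => simp [loopA]
  | cons c rest =>
    have h := loopA_eq_loopB source.toList c rest 0 0 (Nat.zero_le _)
    simpa using h
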